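-- pv_equiv track=rewrite | github.com/techdog21/Kitchensync-Project | kitchensyncLive.py | calcRisk
-- ===== SOURCE A (Python) =====
-- def calcRisk(lst:list, item:str) -> int:
--     """ Generate risk figures for detailed data points """
--     # create counters
--     ccounter = 0
--     hcounter = 0
--     mcounter = 0
--     lcounter = 0
--     ncounter = 0
--     newLst = []
--     # found this method: https://www.programiz.com/python-programming/methods/list/count
--     if item != 'all':
--         for rows in lst:
--             if (rows[4] == item):
--                 newLst.append(rows)
--     if item != 'all':
--         for rows in newLst: # calc special list
--             ccounter += rows[3].count('Critical')
--             hcounter += rows[3].count('High')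
--             mcounter += rows[3].count('Medium')
--             lcounter += rows[3].count('Low')
--             ncounter += rows[3].count('None')
--     else:
--         for rows in lst: # calc whole list
--             ccounter += rows[3].count('Critical')
--             hcounter += rows[3].count('High')
--             mcounter += rows[3].count('Medium')
--             lcounter += rows[3].count('Low')
--             ncounter += rows[3].count('None')
--
--     # return multiple: https://note.nkmk.me/en/python-function-return-multiple-values/
--     return ccounter, hcounter, mcounter, lcounter, ncounter
-- ===== SOURCE B (Python) =====
-- def calcRisk(lst: list, item: str) -> int:
--     """ Generate risk figures for detailed data points """
--     def tally(word):
--         return sum(rows[3].count(word) for rows in lst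
--                    if item == 'all' or rows[4] == item)
--     return (tally('Critical'), tally('High'), tally('Medium'),
--             tally('Low'), tally('None'))
-- ===== Notes on version B (the rewrite author's own statement) =====
-- stated objective: simpler
-- what changed: Replaces the filter-into-newLst pass plus a five-counter accumulation loop by a per-keyword decomposition: one small helper sums rows[3].count(word) over the rows matching the predicate, applied to the five keywords; no intermediate list and no mutable counters.
import Mathlib
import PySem

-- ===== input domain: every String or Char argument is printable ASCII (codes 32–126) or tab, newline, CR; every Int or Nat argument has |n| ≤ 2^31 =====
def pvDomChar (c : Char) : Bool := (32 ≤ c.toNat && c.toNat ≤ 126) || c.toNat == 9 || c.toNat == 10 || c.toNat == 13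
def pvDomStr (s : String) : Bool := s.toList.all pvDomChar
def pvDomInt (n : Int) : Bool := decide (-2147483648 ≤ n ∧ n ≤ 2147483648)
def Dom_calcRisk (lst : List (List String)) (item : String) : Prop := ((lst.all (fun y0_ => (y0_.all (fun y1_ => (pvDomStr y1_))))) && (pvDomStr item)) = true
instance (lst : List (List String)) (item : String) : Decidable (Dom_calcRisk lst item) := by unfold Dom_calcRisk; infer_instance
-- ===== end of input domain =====

-- B replaces A's filter-into-newLst pass plus five-counter accumulation loop by a per-keyword
-- helper summing rows[3].count(word) over matching rows (objective: simpler decomposition).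

-- ===== PORT A =====
-- rows[4] / rows[3] are ported with pyGet?; the .getD "" default is never reached on Pre_.
def calcRisk (lst : List (List String)) (item : String) : Int × Int × Int × Int × Int :=
  -- counters start at 0; newLst starts empty
  let newLst : List (List String) :=
    if item ≠ "all" then
      lst.foldl (fun acc rows =>
        if (PySem.List.pyGet? rows 4).getD "" == item then acc ++ [rows] else acc) []
    else []
  if item ≠ "all" then
    newLst.foldl (fun (s : Int × Int × Int × Int × Int) rows =>
      let r3 := (PySem.List.pyGet? rows 3).getD ""
      (s.1 + (PySem.Str.count r3 "Critical" : Int),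
       s.2.1 + (PySem.Str.count r3 "High" : Int),
       s.2.2.1 + (PySem.Str.count r3 "Medium" : Int),
       s.2.2.2.1 + (PySem.Str.count r3 "Low" : Int),
       s.2.2.2.2 + (PySem.Str.count r3 "None" : Int))) (0, 0, 0, 0, 0)
  else
    lst.foldl (fun (s : Int × Int × Int × Int × Int) rows =>
      let r3 := (PySem.List.pyGet? rows 3).getD ""
      (s.1 + (PySem.Str.count r3 "Critical" : Int),
       s.2.1 + (PySem.Str.count r3 "High" : Int),
       s.2.2.1 + (PySem.Str.count r3 "Medium" : Int),
       s.2.2.2.1 + (PySem.Str.count r3 "Low" : Int),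
       s.2.2.2.2 + (PySem.Str.count r3 "None" : Int))) (0, 0, 0, 0, 0)

-- ===== PORT B =====
-- tally(word) = sum of rows[3].count(word) over rows with item == 'all' or rows[4] == item
def calcRiskTally (lst : List (List String)) (item : String) (word : String) : Int :=
  lst.foldl (fun acc rows =>
    if item == "all" || (PySem.List.pyGet? rows 4).getD "" == item then
      acc + (PySem.Str.count ((PySem.List.pyGet? rows 3).getD "") word : Int)
    else acc) 0

def calcRisk_alt (lst : List (List String)) (item : String) : Int × Int × Int × Int × Int :=
  (calcRiskTally lst item "Critical", calcRiskTally lst item "High",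
   calcRiskTally lst item "Medium", calcRiskTally lst item "Low",
   calcRiskTally lst item "None")

-- ===== PRECONDITION & SPEC =====
-- Pre_ excludes exactly the inputs where Python A raises IndexError: with item == 'all' A reads
-- rows[3] of every row, otherwise it reads rows[4] of every row (and rows[3] of matching rows).
def Pre_calcRisk (lst : List (List String)) (item : String) : Prop :=
  if item = "all" then ∀ rows ∈ lst, 4 ≤ rows.length else ∀ rows ∈ lst, 5 ≤ rows.length
instance (lst : List (List String)) (item : String) : Decidable (Pre_calcRisk lst item) := by
  unfold Pre_calcRisk; infer_instance

def pvWitness_calcRisk : List (List String) × String :=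
  ([["1", "h", "d", "Critical High", "srv"], ["2", "h", "d", "Low None", "db"]], "srv")

def Spec_calcRisk (lst : List (List String)) (item : String) (out : Int × Int × Int × Int × Int) : Prop := out = calcRisk_alt lst item
instance (lst : List (List String)) (item : String) (out : Int × Int × Int × Int × Int) : Decidable (Spec_calcRisk lst item out) := by unfold Spec_calcRisk; infer_instance

-- ===== CLAIM (what is proved, stated in full; the proofs are below) =====
def Claim_equal_calcRisk : Prop := ∀ (lst : List (List String)) (item : String), Dom_calcRisk lst item → Pre_calcRisk lst item → Spec_calcRisk lst item (calcRisk lst item)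

-- ===== LEMMAS AND PROOFS =====

-- a 5-tuple counter fold splits into five independent scalar folds
theorem calcRisk_fold5 (g1 g2 g3 g4 g5 : List String → Int) (xs : List (List String))
    (c h m l n : Int) :
    xs.foldl (fun (s : Int × Int × Int × Int × Int) r =>
      (s.1 + g1 r, s.2.1 + g2 r, s.2.2.1 + g3 r, s.2.2.2.1 + g4 r, s.2.2.2.2 + g5 r))
      (c, h, m, l, n)
    = (xs.foldl (fun a r => a + g1 r) c, xs.foldl (fun a r => a + g2 r) h,
       xs.foldl (fun a r => a + g3 r) m, xs.foldl (fun a r => a + g4 r) l,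
       xs.foldl (fun a r => a + g5 r) n) := by
  induction xs generalizing c h m l n with
  | nil => rfl
  | cons x xs ih => simp [List.foldl, ih]

theorem calcRisk_spec : Claim_equal_calcRisk := by
  intro lst item _ _
  unfold Spec_calcRisk calcRisk calcRisk_alt calcRiskTally
  by_cases hall : item = "all"
  · subst hall
    simp only [ne_eq, not_true_eq_false, if_false, BEq.rfl, Bool.true_or,
      if_true, calcRisk_fold5]
  · have hne : (item == "all") = false := beq_eq_false_iff_ne.mpr hall
    simp only [ne_eq, hall, not_false_iff, if_true, calcRisk_fold5,
      PySem.List.foldl_append_if_eq_filter, List.nil_append, hne, Bool.false_or]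
    simp only [← PySem.List.foldl_if_eq_foldl_filter]

-- ===== VERDICT (by name: the statement is the Claim_ definition above) =====
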